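-- pv_equiv track=rewrite | github.com/changpzh/sf_python | 考勤信息.py | is_late_or_leaveearly_or_absent_bigger_than_3_in_any_continuous_7_days
-- ===== SOURCE A (Python) =====
-- def is_late_or_leaveearly_or_absent_bigger_than_3_in_any_continuous_7_days(attendance_list):
--     list_len = len(attendance_list)
--     if list_len < 7:
--         return False
--
--     for i in range(len(attendance_list)):
--         tmp_list = attendance_list[i:i + 7]
--         tmp_total = 0
--         for attendance in tmp_list:
--             if attendance in ['absent', 'late', 'leaveearly']:
--                 tmp_total += 1
--                 if tmp_total > 3:
--                     return True
--     else:
--         return False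
-- ===== SOURCE B (Python) =====
-- def is_late_or_leaveearly_or_absent_bigger_than_3_in_any_continuous_7_days(attendance_list):
--     n = len(attendance_list)
--     if n < 7:
--         return False
--     bad = ('absent', 'late', 'leaveearly')
--     cnt = 0
--     for x in attendance_list[:7]:
--         if x in bad:
--             cnt += 1
--     if cnt > 3:
--         return True
--     for j in range(7, n):
--         if attendance_list[j] in bad:
--             cnt += 1
--         if attendance_list[j - 7] in bad:
--             cnt -= 1
--         if cnt > 3:
--             return True
--     return False
-- ===== Notes on version B (the rewrite author's own statement) =====
-- stated objective: alternative
-- what changed: Replaces A's rescan of a fresh 7-element slice at every start index with a single pass that maintains a running count of bad entries in a sliding 7-day window (increment on the entering day, decrement on the leaving day); end-of-list short windows need no check since they are suffixes of the last full window.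
import Mathlib
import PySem

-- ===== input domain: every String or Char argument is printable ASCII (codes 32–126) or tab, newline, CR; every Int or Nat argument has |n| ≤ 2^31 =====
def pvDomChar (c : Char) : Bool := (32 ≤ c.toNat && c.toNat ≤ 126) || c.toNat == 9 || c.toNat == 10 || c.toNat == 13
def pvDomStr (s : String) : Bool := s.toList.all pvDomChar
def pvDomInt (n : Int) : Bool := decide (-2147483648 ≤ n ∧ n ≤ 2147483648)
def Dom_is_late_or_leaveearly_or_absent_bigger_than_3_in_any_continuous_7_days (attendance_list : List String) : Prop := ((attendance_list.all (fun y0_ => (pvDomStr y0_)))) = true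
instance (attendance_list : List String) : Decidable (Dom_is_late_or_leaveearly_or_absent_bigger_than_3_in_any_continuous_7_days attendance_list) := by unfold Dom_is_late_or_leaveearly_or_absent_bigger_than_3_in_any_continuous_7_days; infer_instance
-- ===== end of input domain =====

-- B replaces A's per-index rescan of each 7-element slice with a single sliding-window pass
-- maintaining a running count of bad entries (objective: alternative algorithm).


-- ===== PORT A =====
-- the list ['absent', 'late', 'leaveearly'] from A's membership test
def pvBadList : List String := ["absent", "late", "leaveearly"]

-- inner 'for attendance in tmp_list' loop; true = the 'return True' was taken
def pvInnerA : List String → Int → Bool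
  | [], _ => false
  | attendance :: rest, tmp_total =>
    if attendance ∈ pvBadList then
      let t := tmp_total + 1
      if t > 3 then true else pvInnerA rest t
    else pvInnerA rest tmp_total

-- outer 'for i in range(len(attendance_list))' loop
def pvOuterA (xs : List String) : List Int → Bool
  | [] => false
  | i :: rest =>
    if pvInnerA (PySem.List.slice xs (some i) (some (i + 7))) 0 then true
    else pvOuterA xs rest

def is_late_or_leaveearly_or_absent_bigger_than_3_in_any_continuous_7_days (attendance_list : List String) : Bool :=
  let list_len : Int := attendance_list.length
  if list_len < 7 then false
  else pvOuterA attendance_list (PySem.List.pyRange 0 attendance_list.length 1)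

-- ===== PORT B =====
-- membership in the tuple ('absent', 'late', 'leaveearly')
def pvBad (s : String) : Bool := s == "absent" || s == "late" || s == "leaveearly"

-- 'for x in attendance_list[:7]: if x in bad: cnt += 1'
def pvInit : List String → Int → Int
  | [], cnt => cnt
  | x :: rest, cnt => pvInit rest (if pvBad x then cnt + 1 else cnt)

-- 'for j in range(7, n)' sliding pass; pyGetD with default "" is exact: j and j-7 are always in range here
def pvSlide (xs : List String) : List Int → Int → Bool
  | [], _ => false
  | j :: rest, cnt =>
    let cnt1 := if pvBad (PySem.List.pyGetD xs j "") then cnt + 1 else cnt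
    let cnt2 := if pvBad (PySem.List.pyGetD xs (j - 7) "") then cnt1 - 1 else cnt1
    if cnt2 > 3 then true else pvSlide xs rest cnt2

def is_late_or_leaveearly_or_absent_bigger_than_3_in_any_continuous_7_days_alt (attendance_list : List String) : Bool :=
  let n : Int := attendance_list.length
  if n < 7 then false
  else
    let cnt := pvInit (PySem.List.slice attendance_list none (some 7)) 0
    if cnt > 3 then true
    else pvSlide attendance_list (PySem.List.pyRange 7 n 1) cnt

-- ===== PRECONDITION & SPEC =====
def Spec_is_late_or_leaveearly_or_absent_bigger_than_3_in_any_continuous_7_days (attendance_list : List String) (out : Bool) : Prop := out = is_late_or_leaveearly_or_absent_bigger_than_3_in_any_continuous_7_days_alt attendance_list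
instance (attendance_list : List String) (out : Bool) : Decidable (Spec_is_late_or_leaveearly_or_absent_bigger_than_3_in_any_continuous_7_days attendance_list out) := by unfold Spec_is_late_or_leaveearly_or_absent_bigger_than_3_in_any_continuous_7_days; infer_instance

-- ===== CLAIM (what is proved, stated in full; the proofs are below) =====
def Claim_equal_is_late_or_leaveearly_or_absent_bigger_than_3_in_any_continuous_7_days : Prop := ∀ (attendance_list : List String), Dom_is_late_or_leaveearly_or_absent_bigger_than_3_in_any_continuous_7_days attendance_list → Spec_is_late_or_leaveearly_or_absent_bigger_than_3_in_any_continuous_7_days attendance_list (is_late_or_leaveearly_or_absent_bigger_than_3_in_any_continuous_7_days attendance_list)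

-- ===== LEMMAS AND PROOFS =====

-- count of bad entries in the 7-window starting at k
def pvW (xs : List String) (k : Nat) : Nat := ((xs.drop k).take 7).countP pvBad

lemma pv_mem_iff (s : String) : s ∈ pvBadList ↔ pvBad s = true := by
  simp [pvBadList, pvBad]; tauto

lemma pv_innerA_iff (l : List String) : ∀ t : Int, t ≤ 3 →
    (pvInnerA l t = true ↔ 3 < t + (l.countP pvBad : Int)) := by
  induction l with
  | nil => intro t ht; simp [pvInnerA]; omega
  | cons a l ih =>
    intro t ht
    by_cases hb : a ∈ pvBadList
    · have hba : pvBad a = true := (pv_mem_iff a).mp hb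
      have hc : ((a :: l).countP pvBad : Int) = (l.countP pvBad : Int) + 1 := by
        simp [hba]
      by_cases h4 : t + 1 > 3
      · have : pvInnerA (a :: l) t = true := by simp [pvInnerA, hb, h4]
        rw [this, hc]
        have : (0 : Int) ≤ (l.countP pvBad : Int) := Int.natCast_nonneg _
        simp; omega
      · have : pvInnerA (a :: l) t = pvInnerA l (t + 1) := by simp [pvInnerA, hb, h4]
        rw [this, ih (t + 1) (by omega), hc]
        constructor <;> intro h <;> omega
    · have hba : pvBad a = false := by
        by_contra h
        exact hb ((pv_mem_iff a).mpr (by revert h; cases pvBad a <;> simp))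
      have hc : ((a :: l).countP pvBad : Int) = (l.countP pvBad : Int) := by
        simp [hba]
      have : pvInnerA (a :: l) t = pvInnerA l t := by simp [pvInnerA, hb]
      rw [this, ih t ht, hc]

lemma pv_outerA_any (xs : List String) (is : List Int) :
    pvOuterA xs is = is.any (fun i => pvInnerA (PySem.List.slice xs (some i) (some (i + 7))) 0) := by
  induction is with
  | nil => simp [pvOuterA]
  | cons i rest ih =>
    simp only [pvOuterA, List.any_cons]
    split <;> simp_all

lemma pv_slice_window (xs : List String) (k : Nat) :
    PySem.List.slice xs (some (k : Int)) (some ((k : Int) + 7)) = (xs.drop k).take 7 := by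
  have : ((k : Int) + 7) = ((k : Int) + ((7 : Nat) : Int)) := by norm_num
  rw [this, PySem.List.slice_natCast_add]

-- A is true iff some window starting at k < n has more than 3 bad entries
lemma pv_A_iff (xs : List String) (hn : 7 ≤ xs.length) :
    (is_late_or_leaveearly_or_absent_bigger_than_3_in_any_continuous_7_days xs = true
      ↔ ∃ k, k < xs.length ∧ 3 < pvW xs k) := by
  unfold is_late_or_leaveearly_or_absent_bigger_than_3_in_any_continuous_7_days
  have h7 : ¬ ((xs.length : Int) < 7) := by omega
  simp only [h7, if_false]
  rw [pv_outerA_any, List.any_eq_true]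
  constructor
  · rintro ⟨i, hi, hinner⟩
    rw [PySem.List.mem_pyRange_one] at hi
    obtain ⟨k, rfl⟩ : ∃ k : Nat, (k : Int) = i := ⟨i.toNat, by omega⟩
    refine ⟨k, by omega, ?_⟩
    rw [pv_slice_window] at hinner
    have := (pv_innerA_iff ((xs.drop k).take 7) 0 (by norm_num)).mp hinner
    unfold pvW; omega
  · rintro ⟨k, hk, hw⟩
    refine ⟨(k : Int), ?_, ?_⟩
    · rw [PySem.List.mem_pyRange_one]; omega
    · rw [pv_slice_window]
      exact (pv_innerA_iff ((xs.drop k).take 7) 0 (by norm_num)).mpr (by unfold pvW at hw; omega)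

-- short tail windows are suffixes of the last full window, so full windows suffice
lemma pv_full_windows (xs : List String) (hn : 7 ≤ xs.length) :
    (∃ k, k < xs.length ∧ 3 < pvW xs k) ↔ (∃ k, k + 7 ≤ xs.length ∧ 3 < pvW xs k) := by
  constructor
  · rintro ⟨k, hk, hw⟩
    by_cases h : k + 7 ≤ xs.length
    · exact ⟨k, h, hw⟩
    · refine ⟨xs.length - 7, by omega, ?_⟩
      have h1 : pvW xs k ≤ pvW xs (xs.length - 7) := by
        unfold pvW
        have hlen : (xs.drop k).length ≤ 7 := by simp; omega
        have hlen2 : (xs.drop (xs.length - 7)).length ≤ 7 := by simp; omega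
        rw [List.take_of_length_le hlen, List.take_of_length_le hlen2]
        have : xs.drop k = (xs.drop (xs.length - 7)).drop (k - (xs.length - 7)) := by
          rw [List.drop_drop]; congr 1; omega
        rw [this]
        exact (List.drop_sublist _ _).countP_le
      omega
  · rintro ⟨k, hk, hw⟩; exact ⟨k, by omega, hw⟩

-- prefix counts and the sliding identity
def pvP (xs : List String) (m : Nat) : Nat := (xs.take m).countP pvBad

lemma pv_P_window (xs : List String) (k : Nat) : pvP xs k + pvW xs k = pvP xs (k + 7) := by
  unfold pvP pvW
  have hsplit : xs.take (k + 7) = (xs.take (k + 7)).take k ++ ((xs.take (k + 7)).drop k) :=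
    (List.take_append_drop k _).symm
  rw [hsplit, List.countP_append, List.take_take, List.drop_take,
    Nat.min_eq_left (by omega : k ≤ k + 7), (by omega : k + 7 - k = 7)]

lemma pv_P_succ (xs : List String) (m : Nat) (hm : m < xs.length) :
    pvP xs (m + 1) = pvP xs m + (if pvBad (xs.getD m "") then 1 else 0) := by
  unfold pvP
  rw [List.take_add_one, List.countP_append, List.getElem?_eq_getElem hm]
  simp [List.getD, List.getElem?_eq_getElem hm, List.countP_cons]

-- the sliding step: window at j-6 = window at j-7 + entering day j - leaving day j-7
lemma pv_W_step (xs : List String) (j : Nat) (h7 : 7 ≤ j) (hj : j < xs.length) :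
    (pvW xs (j - 6) : Int) = (pvW xs (j - 7) : Int)
      + (if pvBad (xs.getD j "") then 1 else 0)
      - (if pvBad (xs.getD (j - 7) "") then 1 else 0) := by
  have e1 := pv_P_window xs (j - 6)
  have e2 := pv_P_window xs (j - 7)
  have e3 := pv_P_succ xs j hj
  have e4 := pv_P_succ xs (j - 7) (by omega)
  have h1 : j - 6 + 7 = j + 1 := by omega
  have h2 : j - 7 + 7 = j := by omega
  have h3 : j - 7 + 1 = j - 6 := by omega
  rw [h1] at e1; rw [h2] at e2; rw [h3] at e4
  split_ifs at e3 e4 ⊢ <;> omega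

lemma pv_init_count (l : List String) : ∀ c : Int, pvInit l c = c + (l.countP pvBad : Int) := by
  induction l with
  | nil => intro c; simp [pvInit]
  | cons x rest ih =>
    intro c
    by_cases hx : pvBad x <;> simp [pvInit, hx, ih]; ring

-- loop invariant for the sliding pass
lemma pv_slide_iff (xs : List String) : ∀ d j : Nat, 7 ≤ j → j + d = xs.length →
    (pvSlide xs (PySem.List.pyRange (j : Int) (xs.length : Int) 1) ((pvW xs (j - 7) : Int)) = true
      ↔ ∃ k, j - 7 < k ∧ k + 7 ≤ xs.length ∧ 3 < pvW xs k) := by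
  intro d
  induction d with
  | zero =>
    intro j h7 hlen
    rw [PySem.List.pyRange_one_eq_nil (by omega)]
    simp only [pvSlide, Bool.false_eq_true, false_iff, not_exists]
    rintro k ⟨h1, h2, _⟩
    omega
  | succ d ih =>
    intro j h7 hlen
    have hj : j < xs.length := by omega
    rw [PySem.List.pyRange_one_cons (by exact_mod_cast hj)]
    have hc7 : ((j : Int) - 7) = (((j - 7 : Nat)) : Int) := by omega
    have hc1 : ((j : Int) + 1) = (((j + 1 : Nat)) : Int) := by omega
    simp only [pvSlide, hc7, hc1, PySem.List.pyGetD_natCast]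
    have hstep : (if pvBad (xs.getD (j - 7) "") then
          (if pvBad (xs.getD j "") then ((pvW xs (j - 7) : Int)) + 1 else ((pvW xs (j - 7) : Int))) - 1
        else (if pvBad (xs.getD j "") then ((pvW xs (j - 7) : Int)) + 1 else ((pvW xs (j - 7) : Int))))
        = ((pvW xs (j - 6) : Int)) := by
      rw [pv_W_step xs j h7 hj]; split_ifs <;> ring
    rw [hstep]
    have h16 : j + 1 - 7 = j - 6 := by omega
    by_cases h3 : ((pvW xs (j - 6) : Int)) > 3
    · simp only [h3, if_true, true_iff]
      exact ⟨j - 6, by omega, by omega, by exact_mod_cast h3⟩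
    · simp only [h3, if_false]
      have ih' := ih (j + 1) (by omega) (by omega)
      rw [h16] at ih'
      rw [ih']
      constructor
      · rintro ⟨k, h1, h2, h4⟩; exact ⟨k, by omega, h2, h4⟩
      · rintro ⟨k, h1, h2, h4⟩
        refine ⟨k, ?_, h2, h4⟩
        rcases Nat.lt_or_ge (j - 6) k with h | h
        · exact h
        · exfalso
          have hk : k = j - 6 := by omega
          rw [hk] at h4
          omega

-- B is true iff some full window has more than 3 bad entries
lemma pv_B_iff (xs : List String) (hn : 7 ≤ xs.length) :
    (is_late_or_leaveearly_or_absent_bigger_than_3_in_any_continuous_7_days_alt xs = true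
      ↔ ∃ k, k + 7 ≤ xs.length ∧ 3 < pvW xs k) := by
  unfold is_late_or_leaveearly_or_absent_bigger_than_3_in_any_continuous_7_days_alt
  have h7 : ¬ ((xs.length : Int) < 7) := by omega
  simp only [h7, if_false]
  have hsl : PySem.List.slice xs none (some (7 : Int)) = xs.take 7 := by
    have := PySem.List.slice_to_natCast (xs := xs) (b := 7)
    simpa using this
  rw [hsl, pv_init_count]
  have hcnt : (0 : Int) + ((xs.take 7).countP pvBad : Int) = ((pvW xs 0 : Nat) : Int) := by
    unfold pvW; simp
  rw [hcnt]
  have hc77 : ((7 : Nat) : Int) = (7 : Int) := by norm_num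
  by_cases h0 : ((pvW xs 0 : Nat) : Int) > 3
  · simp only [h0, if_true, true_iff]
    exact ⟨0, by omega, by exact_mod_cast h0⟩
  · simp only [h0, if_false]
    have h70 : (7 : Nat) - 7 = 0 := by omega
    have := pv_slide_iff xs (xs.length - 7) 7 (by omega) (by omega)
    rw [h70, hc77] at this
    rw [this]
    constructor
    · rintro ⟨k, h1, h2, h4⟩; exact ⟨k, h2, h4⟩
    · rintro ⟨k, h2, h4⟩
      refine ⟨k, ?_, h2, h4⟩
      rcases Nat.eq_zero_or_pos k with h | h
      · exfalso; rw [h] at h4; omega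
      · omega

-- ===== VERDICT (by name: the statement is the Claim_ definition above) =====
theorem is_late_or_leaveearly_or_absent_bigger_than_3_in_any_continuous_7_days_spec : Claim_equal_is_late_or_leaveearly_or_absent_bigger_than_3_in_any_continuous_7_days := by
  intro xs _
  unfold Spec_is_late_or_leaveearly_or_absent_bigger_than_3_in_any_continuous_7_days
  by_cases hn : 7 ≤ xs.length
  · rw [Bool.eq_iff_iff, pv_A_iff xs hn, pv_B_iff xs hn, pv_full_windows xs hn]
  · unfold is_late_or_leaveearly_or_absent_bigger_than_3_in_any_continuous_7_days
      is_late_or_leaveearly_or_absent_bigger_than_3_in_any_continuous_7_days_alt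
    have : ((xs.length : Int) < 7) := by omega
    simp [this]
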